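-- pv_equiv track=rewrite | github.com/DDMAL/HHP-EventsEditor | framework/load.py | processTimeLocation
-- ===== SOURCE A (Python) =====
-- locationMark = ['l:in', 'l:at', 'l:on', 'l:from']
--
-- timeMark = ['t:in', 't:at', 't:on', 't:from', 't:during', 't:between', 't:before' , 't:after', 't:while', 't:when']
--
-- def processTimeLocation(conditionList, Mark, conditionBuffer):
-- 	if conditionList == []:
-- 		return conditionBuffer
-- 	else:
-- 		condition = conditionList.pop(0)
-- 		conditionChar = list(condition)
-- 		conditionWord = condition.split()
-- 		if conditionChar[0:2] == ['L',':']: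
-- 			if locationMark.count(conditionWord[0].lower()) == 0:
-- 				prepositionChar = conditionChar[2: len(conditionWord[0])]
-- 				prepositionWord = "".join(prepositionChar)
-- 				conditionBuffer += " in " + " ".join([prepositionWord] + conditionWord[1:])
-- 				return processTimeLocation(conditionList, 'L', conditionBuffer)
-- 			else:
-- 				prepositionChar = conditionChar[2: len(conditionWord[0])]
-- 				prepositionWord = "".join(prepositionChar)
-- 				conditionBuffer += " " + " ".join([prepositionWord] + conditionWord[1:])
-- 				return processTimeLocation(conditionList, 'L', conditionBuffer)
-- 		elif conditionChar[0:2] == ['T',':']: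
-- 			if not timeMark.count(conditionWord[0].lower()) == 0:
-- 				processedChar = conditionChar[2: len(conditionWord[0])]
-- 				processedWord = "".join(processedChar)
-- 				conditionBuffer += " " + " ".join([processedWord.lower()] + conditionWord[1:])
-- 				return processTimeLocation(conditionList, 'T', conditionBuffer)
-- 			elif Mark == 'T' and timeMark.count(conditionWord[0].lower()) == 0:
-- 				processedChar = conditionChar[2: len(conditionWord[0])]
-- 				processedWord = "".join(processedChar)
-- 				conditionBuffer += " " + " ".join([processedWord.lower()] + conditionWord[1:])
-- 				return processTimeLocation(conditionList, 'T', conditionBuffer)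
-- 			else:
-- 				conditionBuffer += " in " + " ".join(conditionWord)
-- 				return processTimeLocation(conditionList, 'T', conditionBuffer)
-- 		else:
-- 			conditionBuffer += " " + condition
-- 			return processTimeLocation(conditionList, 'None', conditionBuffer)
-- ===== SOURCE B (Python) =====
-- locationMark = ['l:in', 'l:at', 'l:on', 'l:from']
--
-- timeMark = ['t:in', 't:at', 't:on', 't:from', 't:during', 't:between', 't:before', 't:after', 't:while', 't:when']
--
--
-- def processTimeLocation(conditionList, Mark, conditionBuffer):
--     # Iterative rewrite: one while-loop with local mark/buffer state instead of
--     # tail recursion; pop(0) is kept so the argument list is emptied as in A.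
--     mark = Mark
--     buffer = conditionBuffer
--     while conditionList:
--         condition = conditionList.pop(0)
--         words = condition.split()
--         if condition.startswith('L:'):
--             head = words[0]
--             prep = condition[2:len(head)]
--             sep = ' ' if head.lower() in locationMark else ' in '
--             buffer += sep + ' '.join([prep] + words[1:])
--             mark = 'L'
--         elif condition.startswith('T:'):
--             head = words[0]
--             if head.lower() in timeMark or mark == 'T':
--                 buffer += ' ' + ' '.join([condition[2:len(head)].lower()] + words[1:])
--             else:
--                 buffer += ' in ' + ' '.join(words)
--             mark = 'T'
--         else:
--             buffer += ' ' + condition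
--             mark = 'None'
--     return buffer
-- ===== Notes on version B (the rewrite author's own statement) =====
-- stated objective: idiomatic
-- what changed: Replaced A's tail recursion with four duplicated append-and-recurse branches by a single while-loop with local mark/buffer state, string slicing/startswith instead of char-list surgery, and the two identical T-branches merged into one 'in timeMark or mark==T' test.
import Mathlib
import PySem

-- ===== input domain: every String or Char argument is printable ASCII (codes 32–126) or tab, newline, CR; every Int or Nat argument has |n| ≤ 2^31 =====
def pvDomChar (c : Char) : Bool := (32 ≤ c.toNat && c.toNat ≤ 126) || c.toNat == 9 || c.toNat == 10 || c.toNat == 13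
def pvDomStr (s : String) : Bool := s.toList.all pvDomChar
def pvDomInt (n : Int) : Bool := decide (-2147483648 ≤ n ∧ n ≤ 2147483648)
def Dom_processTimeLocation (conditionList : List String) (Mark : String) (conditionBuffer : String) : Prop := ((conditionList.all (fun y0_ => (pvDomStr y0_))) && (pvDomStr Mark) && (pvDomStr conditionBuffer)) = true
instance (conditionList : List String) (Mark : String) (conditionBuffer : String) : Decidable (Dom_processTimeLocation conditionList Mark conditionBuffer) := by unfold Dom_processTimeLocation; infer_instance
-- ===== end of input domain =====

-- B rewrites A's four-way tail recursion as one while-loop (a fold) with local mark/buffer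
-- state and merged T-branches (idiomatic, same cost); both Pythons empty the argument list
-- via pop(0), the theorems are about the return value.

def locationMark : List String := ["l:in", "l:at", "l:on", "l:from"]

def timeMark : List String := ["t:in", "t:at", "t:on", "t:from", "t:during", "t:between", "t:before", "t:after", "t:while", "t:when"]

-- ===== PORT A =====
-- conditionWord[0] is ported as headI: in the branches where Python indexes [0], the first
-- character of condition is 'L'/'T' (non-whitespace), so split() is nonempty and [0] is in range.
def processTimeLocation (conditionList : List String) (Mark : String) (conditionBuffer : String) : String :=
  match conditionList with
  | [] => conditionBuffer
  | condition :: rest =>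
    let conditionChar := condition.toList
    let conditionWord := PySem.Str.split₀ condition
    if PySem.List.slice conditionChar (some 0) (some 2) = ['L', ':'] then
      if PySem.List.count locationMark (PySem.Str.lower conditionWord.headI) = 0 then
        let prepositionChar := PySem.List.slice conditionChar (some 2) (some (PySem.Str.len conditionWord.headI))
        let prepositionWord := String.ofList prepositionChar
        processTimeLocation rest "L" (conditionBuffer ++ (" in " ++ PySem.Str.join " " (prepositionWord :: conditionWord.tail)))
      else
        let prepositionChar := PySem.List.slice conditionChar (some 2) (some (PySem.Str.len conditionWord.headI))
        let prepositionWord := String.ofList prepositionChar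
        processTimeLocation rest "L" (conditionBuffer ++ (" " ++ PySem.Str.join " " (prepositionWord :: conditionWord.tail)))
    else if PySem.List.slice conditionChar (some 0) (some 2) = ['T', ':'] then
      if ¬ (PySem.List.count timeMark (PySem.Str.lower conditionWord.headI) = 0) then
        let processedChar := PySem.List.slice conditionChar (some 2) (some (PySem.Str.len conditionWord.headI))
        let processedWord := String.ofList processedChar
        processTimeLocation rest "T" (conditionBuffer ++ (" " ++ PySem.Str.join " " (PySem.Str.lower processedWord :: conditionWord.tail)))
      else if Mark = "T" ∧ PySem.List.count timeMark (PySem.Str.lower conditionWord.headI) = 0 then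
        let processedChar := PySem.List.slice conditionChar (some 2) (some (PySem.Str.len conditionWord.headI))
        let processedWord := String.ofList processedChar
        processTimeLocation rest "T" (conditionBuffer ++ (" " ++ PySem.Str.join " " (PySem.Str.lower processedWord :: conditionWord.tail)))
      else
        processTimeLocation rest "T" (conditionBuffer ++ (" in " ++ PySem.Str.join " " conditionWord))
    else
      processTimeLocation rest "None" (conditionBuffer ++ (" " ++ condition))

-- ===== PORT B =====
-- one iteration of Source B's while-loop: state = (mark, buffer)
def pvStepB (st : String × String) (condition : String) : String × String :=
  let words := PySem.Str.split₀ condition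
  if PySem.Str.startswith condition "L:" then
    let head := words.headI
    let prep := PySem.Str.slice condition (some 2) (some (PySem.Str.len head))
    let sep := if locationMark.contains (PySem.Str.lower head) then " " else " in "
    ("L", st.2 ++ (sep ++ PySem.Str.join " " (prep :: words.tail)))
  else if PySem.Str.startswith condition "T:" then
    let head := words.headI
    if timeMark.contains (PySem.Str.lower head) || st.1 == "T" then
      ("T", st.2 ++ (" " ++ PySem.Str.join " " (PySem.Str.lower (PySem.Str.slice condition (some 2) (some (PySem.Str.len head))) :: words.tail)))
    else
      ("T", st.2 ++ (" in " ++ PySem.Str.join " " words))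
  else
    ("None", st.2 ++ (" " ++ condition))

def processTimeLocation_alt (conditionList : List String) (Mark : String) (conditionBuffer : String) : String :=
  (conditionList.foldl pvStepB (Mark, conditionBuffer)).2

-- ===== PRECONDITION & SPEC =====
def Spec_processTimeLocation (conditionList : List String) (Mark : String) (conditionBuffer : String) (out : String) : Prop := out = processTimeLocation_alt conditionList Mark conditionBuffer
instance (conditionList : List String) (Mark : String) (conditionBuffer : String) (out : String) : Decidable (Spec_processTimeLocation conditionList Mark conditionBuffer out) := by unfold Spec_processTimeLocation; infer_instance

-- ===== CLAIM (what is proved, stated in full; the proofs are below) =====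
def Claim_equal_processTimeLocation : Prop := ∀ (conditionList : List String) (Mark : String) (conditionBuffer : String), Dom_processTimeLocation conditionList Mark conditionBuffer → Spec_processTimeLocation conditionList Mark conditionBuffer (processTimeLocation conditionList Mark conditionBuffer)

-- ===== LEMMAS AND PROOFS =====

-- xs[0:2] is take 2
lemma slice02 (xs : List Char) : PySem.List.slice xs (some 0) (some 2) = xs.take 2 := by
  have h := PySem.List.slice_to_natCast xs 2
  rw [PySem.List.slice_zero_start]
  simpa using h

-- take 2 = [a,b]  ↔  [a,b] is a prefix
lemma take_two_eq_iff (xs : List Char) (a b : Char) : xs.take 2 = [a, b] ↔ [a, b] <+: xs := by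
  constructor
  · intro h
    rw [List.prefix_iff_eq_take]
    exact h.symm
  · intro h
    exact (List.prefix_iff_eq_take.mp h).symm

-- A equals B's fold, for every starting state
lemma main_loop (l : List String) : ∀ (m b : String),
    processTimeLocation l m b = (l.foldl pvStepB (m, b)).2 := by
  induction l with
  | nil => intro m b; rfl
  | cons c rest ih =>
    intro m b
    rw [List.foldl_cons]
    simp only [processTimeLocation]
    by_cases hL : ['L', ':'] <+: c.toList
    · have hA : PySem.List.slice c.toList (some 0) (some 2) = ['L', ':'] := by
        rw [slice02]; exact (take_two_eq_iff _ _ _).mpr hL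
      have hsw : PySem.Str.startswith c "L:" = true := by
        show PySem.Chars.startswith c.toList ("L:".toList) = true
        rw [PySem.Chars.startswith_iff]; exact hL
      rw [if_pos hA]
      by_cases hmem : PySem.Str.lower (PySem.Str.split₀ c).headI ∈ locationMark
      · have hc : ¬ PySem.List.count locationMark (PySem.Str.lower (PySem.Str.split₀ c).headI) = 0 := by
          rw [PySem.List.count_eq]
          simpa [List.count_eq_zero] using hmem
        have hmemB : locationMark.contains (PySem.Str.lower (PySem.Str.split₀ c).headI) = true := by
          simpa using hmem
        rw [if_neg hc, ih]
        have hstep : pvStepB (m, b) c =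
            ("L", b ++ (" " ++ PySem.Str.join " "
              (String.ofList (PySem.List.slice c.toList (some 2) (some (PySem.Str.len (PySem.Str.split₀ c).headI))) ::
                (PySem.Str.split₀ c).tail))) := by
          simp only [pvStepB]
          rw [if_pos hsw, if_pos hmemB]
          simp [PySem.Str.slice]
        rw [hstep]
      · have hc : PySem.List.count locationMark (PySem.Str.lower (PySem.Str.split₀ c).headI) = 0 := by
          rw [PySem.List.count_eq]
          simpa [List.count_eq_zero] using hmem
        rw [if_pos hc, ih]
        have hstep : pvStepB (m, b) c =
            ("L", b ++ (" in " ++ PySem.Str.join " "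
              (String.ofList (PySem.List.slice c.toList (some 2) (some (PySem.Str.len (PySem.Str.split₀ c).headI))) ::
                (PySem.Str.split₀ c).tail))) := by
          simp only [pvStepB]
          rw [if_pos hsw, if_neg (by simpa using hmem)]
          simp [PySem.Str.slice]
        rw [hstep]
    · have hA : ¬ PySem.List.slice c.toList (some 0) (some 2) = ['L', ':'] := by
        rw [slice02]; exact fun h => hL ((take_two_eq_iff _ _ _).mp h)
      have hsw : ¬ PySem.Str.startswith c "L:" = true := by
        show ¬ PySem.Chars.startswith c.toList ("L:".toList) = true
        rw [PySem.Chars.startswith_iff]; exact hL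
      rw [if_neg hA]
      by_cases hT : ['T', ':'] <+: c.toList
      · have hTA : PySem.List.slice c.toList (some 0) (some 2) = ['T', ':'] := by
          rw [slice02]; exact (take_two_eq_iff _ _ _).mpr hT
        have hswT : PySem.Str.startswith c "T:" = true := by
          show PySem.Chars.startswith c.toList ("T:".toList) = true
          rw [PySem.Chars.startswith_iff]; exact hT
        rw [if_pos hTA]
        by_cases hmem : PySem.Str.lower (PySem.Str.split₀ c).headI ∈ timeMark
        · have hc : ¬ PySem.List.count timeMark (PySem.Str.lower (PySem.Str.split₀ c).headI) = 0 := by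
            rw [PySem.List.count_eq]
            simpa [List.count_eq_zero] using hmem
          rw [if_pos hc, ih]
          have hstep : pvStepB (m, b) c =
              ("T", b ++ (" " ++ PySem.Str.join " "
                (PySem.Str.lower (String.ofList (PySem.List.slice c.toList (some 2) (some (PySem.Str.len (PySem.Str.split₀ c).headI))))  ::
                  (PySem.Str.split₀ c).tail))) := by
            simp only [pvStepB]
            rw [if_neg hsw, if_pos hswT, if_pos (by simp [hmem])]
            simp [PySem.Str.slice]
          rw [hstep]
        · have hc : PySem.List.count timeMark (PySem.Str.lower (PySem.Str.split₀ c).headI) = 0 := by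
            rw [PySem.List.count_eq]
            simpa [List.count_eq_zero] using hmem
          rw [if_neg (not_not_intro hc)]
          by_cases hm : m = "T"
          · rw [if_pos ⟨hm, hc⟩, ih]
            have hstep : pvStepB (m, b) c =
                ("T", b ++ (" " ++ PySem.Str.join " "
                  (PySem.Str.lower (String.ofList (PySem.List.slice c.toList (some 2) (some (PySem.Str.len (PySem.Str.split₀ c).headI))))  ::
                    (PySem.Str.split₀ c).tail))) := by
              simp only [pvStepB]
              rw [if_neg hsw, if_pos hswT, if_pos (by simp [hm])]
              simp [PySem.Str.slice]
            rw [hstep]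
          · rw [if_neg (fun h => hm h.1), ih]
            have hstep : pvStepB (m, b) c =
                ("T", b ++ (" in " ++ PySem.Str.join " " (PySem.Str.split₀ c))) := by
              simp only [pvStepB]
              rw [if_neg hsw, if_pos hswT, if_neg (by simp [hmem, hm])]
            rw [hstep]
      · have hTA : ¬ PySem.List.slice c.toList (some 0) (some 2) = ['T', ':'] := by
          rw [slice02]; exact fun h => hT ((take_two_eq_iff _ _ _).mp h)
        have hswT : ¬ PySem.Str.startswith c "T:" = true := by
          show ¬ PySem.Chars.startswith c.toList ("T:".toList) = true
          rw [PySem.Chars.startswith_iff]; exact hT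
        rw [if_neg hTA, ih]
        have hstep : pvStepB (m, b) c = ("None", b ++ (" " ++ c)) := by
          simp only [pvStepB]
          rw [if_neg hsw, if_neg hswT]
        rw [hstep]

-- ===== VERDICT (by name: the statement is the Claim_ definition above) =====
theorem processTimeLocation_spec : Claim_equal_processTimeLocation := by
  intro conditionList Mark conditionBuffer _
  unfold Spec_processTimeLocation processTimeLocation_alt
  exact main_loop conditionList Mark conditionBuffer
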